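-- pv_equiv track=rewrite | github.com/Leo-D-M-Appourchaux/RAG_on_arXiv_ML | table_editor/modify_latex.py | drop_table_row
-- ===== SOURCE A (Python) =====
-- def drop_table_row(latex_str, row_index=0):
--     """
--     删除第 row_index 行（从 0 开始计数，不包括表头）
--     """
--     new_lines = []
--     data_row_count = 0
--     for line in latex_str.split("\n"):
--         if '&' in line:
--             if data_row_count == row_index:
--                 data_row_count += 1
--                 continue
--             data_row_count += 1
--         new_lines.append(line)
--     return '\n'.join(new_lines)
-- ===== SOURCE B (Python) =====
-- def drop_table_row(latex_str, row_index=0):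
--     """
--     删除第 row_index 行（从 0 开始计数，不包括表头）
--     """
--     lines = latex_str.split("\n")
--     positions = [i for i, line in enumerate(lines) if '&' in line]
--     if 0 <= row_index < len(positions):
--         target = positions[row_index]
--         lines = [line for i, line in enumerate(lines) if i != target]
--     return "\n".join(lines)
-- ===== Notes on version B (the rewrite author's own statement) =====
-- stated objective: alternative
-- what changed: Replaces A's single counting pass (a running data-row counter deciding line by line whether to skip) with a two-phase index-then-filter shape: first build the list of absolute positions of '&'-lines, then, if row_index is in range, rebuild the string keeping every line whose index differs from the selected position.
import Mathlib
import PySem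

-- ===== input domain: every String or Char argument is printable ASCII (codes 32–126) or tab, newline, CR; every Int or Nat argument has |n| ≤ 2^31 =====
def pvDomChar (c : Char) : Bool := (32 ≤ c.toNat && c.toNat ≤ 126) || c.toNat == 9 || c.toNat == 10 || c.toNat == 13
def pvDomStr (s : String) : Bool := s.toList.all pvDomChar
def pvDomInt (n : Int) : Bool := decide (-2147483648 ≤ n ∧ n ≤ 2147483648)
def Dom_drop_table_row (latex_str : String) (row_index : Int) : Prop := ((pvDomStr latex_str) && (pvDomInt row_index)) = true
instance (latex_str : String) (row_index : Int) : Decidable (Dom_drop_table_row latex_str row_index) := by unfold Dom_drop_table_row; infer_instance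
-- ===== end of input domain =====

-- B replaces A's single counting pass by a two-phase shape: collect the absolute positions of
-- all '&'-lines, then filter out the line at the selected position (if row_index is in range).


-- ===== PORT A =====
-- latex_str.split("\n"): sep ≠ "", so PySem.Str.split? is always `some`; `.getD []` only unwraps it.
def drop_table_row (latex_str : String) (row_index : Int) : String :=
  let res := ((PySem.Str.split? latex_str "\n").getD []).foldl
    (fun (st : List String × Int) line =>
      if PySem.Str.isIn "&" line then
        if st.2 == row_index then (st.1, st.2 + 1)
        else (st.1 ++ [line], st.2 + 1)
      else (st.1 ++ [line], st.2))
    ([], 0)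
  PySem.Str.join "\n" res.1

-- ===== PORT B =====
def drop_table_row_alt (latex_str : String) (row_index : Int) : String :=
  let lines := (PySem.Str.split? latex_str "\n").getD []
  let positions := ((PySem.List.enumerate lines).filter
      (fun p => PySem.Str.isIn "&" p.2)).map (fun p => p.1)
  let lines' :=
    if 0 ≤ row_index ∧ row_index < (positions.length : Int) then
      let target := PySem.List.pyGetD positions row_index 0
      ((PySem.List.enumerate lines).filter (fun p => p.1 != target)).map (fun p => p.2)
    else lines
  PySem.Str.join "\n" lines'

-- ===== PRECONDITION & SPEC =====
def Spec_drop_table_row (latex_str : String) (row_index : Int) (out : String) : Prop := out = drop_table_row_alt latex_str row_index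
instance (latex_str : String) (row_index : Int) (out : String) : Decidable (Spec_drop_table_row latex_str row_index out) := by unfold Spec_drop_table_row; infer_instance

-- ===== CLAIM (what is proved, stated in full; the proofs are below) =====
def Claim_equal_drop_table_row : Prop := ∀ (latex_str : String) (row_index : Int), Dom_drop_table_row latex_str row_index → Spec_drop_table_row latex_str row_index (drop_table_row latex_str row_index)

-- ===== LEMMAS AND PROOFS =====

-- A's loop, as a structural recursion on the line list (counter c, target r).
def pvLoopA (r : Int) : List String → Int → List String
  | [], _ => []
  | l :: ls, c =>
    if PySem.Str.isIn "&" l then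
      (if c == r then pvLoopA r ls (c + 1) else l :: pvLoopA r ls (c + 1))
    else l :: pvLoopA r ls c

-- "remove the k-th '&'-line", the common reference of both programs.
def pvRem : List String → Int → List String
  | [], _ => []
  | l :: ls, k =>
    if PySem.Str.isIn "&" l then
      (if k = 0 then ls else l :: pvRem ls (k - 1))
    else l :: pvRem ls k

theorem pvFoldA (r : Int) (ls : List String) (acc : List String) (c : Int) :
    (ls.foldl (fun (st : List String × Int) line =>
      if PySem.Str.isIn "&" line then
        if st.2 == r then (st.1, st.2 + 1)
        else (st.1 ++ [line], st.2 + 1)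
      else (st.1 ++ [line], st.2)) (acc, c)).1 = acc ++ pvLoopA r ls c := by
  induction ls generalizing acc c with
  | nil => simp [pvLoopA]
  | cons l ls ih =>
    simp only [List.foldl_cons, pvLoopA]
    by_cases hamp : PySem.Str.isIn "&" l = true
    · by_cases hc : (c == r) = true
      · rw [if_pos hamp, if_pos hamp, if_pos hc, if_pos hc]
        exact ih acc (c + 1)
      · rw [if_pos hamp, if_pos hamp, if_neg hc, if_neg hc]
        rw [ih (acc ++ [l]) (c + 1)]
        simp
    · rw [if_neg hamp, if_neg hamp, ih (acc ++ [l]) c]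
      simp

theorem pvRem_neg (ls : List String) (k : Int) (hk : k < 0) : pvRem ls k = ls := by
  induction ls generalizing k with
  | nil => rfl
  | cons l ls ih =>
    simp only [pvRem]
    by_cases hamp : PySem.Str.isIn "&" l = true
    · rw [if_pos hamp, if_neg (show ¬ k = 0 by omega), ih (k - 1) (by omega)]
    · rw [if_neg hamp, ih k hk]

theorem pvLoopA_eq (r : Int) (ls : List String) (c : Int) :
    pvLoopA r ls c = pvRem ls (r - c) := by
  induction ls generalizing c with
  | nil => rfl
  | cons l ls ih =>
    simp only [pvLoopA, pvRem]
    by_cases hamp : PySem.Str.isIn "&" l = true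
    · by_cases hc : (c == r) = true
      · have hc' : c = r := by simpa using hc
        rw [if_pos hamp, if_pos hamp, if_pos hc, if_pos (show r - c = 0 by omega),
          ih (c + 1), pvRem_neg ls (r - (c + 1)) (by omega)]
      · have hc' : ¬ c = r := by simpa using hc
        rw [if_pos hamp, if_pos hamp, if_neg hc, if_neg (show ¬ r - c = 0 by omega),
          ih (c + 1), show r - (c + 1) = r - c - 1 by ring]
    · rw [if_neg hamp, if_neg hamp, ih c]

theorem pvRem_ge (ls : List String) (k : Int) (hk : (ls.countP (fun l => PySem.Str.isIn "&" l) : Int) ≤ k) :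
    pvRem ls k = ls := by
  induction ls generalizing k with
  | nil => rfl
  | cons l ls ih =>
    rw [List.countP_cons] at hk
    simp only [pvRem]
    by_cases hamp : PySem.Str.isIn "&" l = true
    · rw [if_pos hamp] at hk
      rw [if_pos hamp, if_neg (show ¬ k = 0 by push_cast at hk; omega),
        ih (k - 1) (by push_cast at hk ⊢; omega)]
    · rw [if_neg hamp] at hk
      rw [if_neg hamp, ih k (by push_cast at hk ⊢; omega)]

-- positions of the '&'-lines, with an arbitrary start offset
def pvPos (s : Int) (ls : List String) : List Int :=
  ((PySem.List.enumerate ls s).filter (fun p => PySem.Str.isIn "&" p.2)).map (fun p => p.1)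

theorem pvPos_ge (s : Int) (ls : List String) : ∀ x ∈ pvPos s ls, s ≤ x := by
  intro x hx
  simp only [pvPos, List.mem_map, List.mem_filter] at hx
  obtain ⟨p, ⟨hp, -⟩, rfl⟩ := hx
  rw [PySem.List.mem_enumerate_iff] at hp
  obtain ⟨k, hk, rfl⟩ := hp
  omega

theorem pvPos_cons (s : Int) (l : String) (ls : List String) :
    pvPos s (l :: ls) =
      if PySem.Str.isIn "&" l then s :: pvPos (s + 1) ls else pvPos (s + 1) ls := by
  simp only [pvPos, PySem.List.enumerate_cons, List.filter_cons]
  by_cases hamp : PySem.Str.isIn "&" l = true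
  · rw [if_pos hamp, if_pos hamp, List.map_cons]
  · rw [if_neg hamp, if_neg hamp]

theorem pvPos_length (s : Int) (ls : List String) :
    (pvPos s ls).length = ls.countP (fun l => PySem.Str.isIn "&" l) := by
  induction ls generalizing s with
  | nil => rfl
  | cons l ls ih =>
    rw [pvPos_cons, List.countP_cons]
    by_cases hamp : PySem.Str.isIn "&" l = true
    · rw [if_pos hamp, if_pos hamp, List.length_cons, ih (s + 1)]
    · rw [if_neg hamp, if_neg hamp, ih (s + 1), Nat.add_zero]

theorem pvFilter_all (s t : Int) (ls : List String) (ht : t < s) :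
    ((PySem.List.enumerate ls s).filter (fun p => p.1 != t)).map (fun p => p.2) = ls := by
  induction ls generalizing s with
  | nil => rfl
  | cons l ls ih =>
    simp only [PySem.List.enumerate_cons, List.filter_cons]
    have h : (s != t) = true := by simp; omega
    rw [if_pos h, List.map_cons, ih (s + 1) (by omega)]

theorem pvMain (ls : List String) (s r : Int) (h0 : 0 ≤ r) (h1 : r < ((pvPos s ls).length : Int)) :
    ((PySem.List.enumerate ls s).filter
        (fun p => p.1 != PySem.List.pyGetD (pvPos s ls) r 0)).map (fun p => p.2)
      = pvRem ls r := by
  induction ls generalizing s r with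
  | nil => simp [pvPos] at h1; omega
  | cons l ls ih =>
    by_cases hamp : PySem.Str.isIn "&" l = true
    · rw [pvPos_cons, if_pos hamp] at h1 ⊢
      have hlen1 : (r : Int) < (pvPos (s + 1) ls).length + 1 := by
        rw [List.length_cons] at h1; push_cast at h1 ⊢; omega
      by_cases hr : r = 0
      · subst hr
        rw [PySem.List.pyGetD_zero_cons]
        simp only [PySem.List.enumerate_cons, List.filter_cons, pvRem]
        rw [if_pos hamp, if_true]
        rw [if_neg (show ¬ ((s != s) = true) by simp)]
        exact pvFilter_all (s + 1) s ls (by omega)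
      · have hr1 : 0 < r := by omega
        have hlen : r - 1 < ((pvPos (s + 1) ls).length : Int) := by omega
        have htgt : PySem.List.pyGetD (s :: pvPos (s + 1) ls) r 0
            = PySem.List.pyGetD (pvPos (s + 1) ls) (r - 1) 0 := by
          rw [PySem.List.pyGetD_eq_getElem _ _ h0 (by rw [List.length_cons]; push_cast; omega),
              PySem.List.pyGetD_eq_getElem _ _ (by omega) (by omega)]
          have h1' : r.toNat = (r - 1).toNat + 1 := by omega
          simp only [h1', List.getElem_cons_succ]
        have hmem : PySem.List.pyGetD (pvPos (s + 1) ls) (r - 1) 0 ∈ pvPos (s + 1) ls :=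
          PySem.List.pyGetD_mem _ _ (by unfold PySem.Raise.InRange; omega)
        have hne : (s != PySem.List.pyGetD (pvPos (s + 1) ls) (r - 1) 0) = true := by
          have := pvPos_ge (s + 1) ls _ hmem
          simp; omega
        rw [htgt]
        simp only [PySem.List.enumerate_cons, List.filter_cons, pvRem]
        rw [if_pos hne, if_pos hamp, if_neg hr, List.map_cons,
          ih (s + 1) (r - 1) (by omega) hlen]
    · rw [pvPos_cons, if_neg hamp] at h1 ⊢
      have hmem : PySem.List.pyGetD (pvPos (s + 1) ls) r 0 ∈ pvPos (s + 1) ls :=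
        PySem.List.pyGetD_mem _ _ (by unfold PySem.Raise.InRange; omega)
      have hne : (s != PySem.List.pyGetD (pvPos (s + 1) ls) r 0) = true := by
        have := pvPos_ge (s + 1) ls _ hmem
        simp; omega
      simp only [PySem.List.enumerate_cons, List.filter_cons, pvRem]
      rw [if_pos hne, if_neg hamp, List.map_cons, ih (s + 1) r h0 h1]

-- ===== VERDICT (by name: the statement is the Claim_ definition above) =====
theorem drop_table_row_spec : Claim_equal_drop_table_row := by
  intro latex_str row_index _
  unfold Spec_drop_table_row
  simp only [drop_table_row, drop_table_row_alt]
  generalize (PySem.Str.split? latex_str "\n").getD [] = ls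
  rw [pvFoldA row_index ls [] 0]
  simp only [List.nil_append, pvLoopA_eq row_index ls 0, sub_zero]
  show PySem.Str.join "\n" (pvRem ls row_index) = _
  have hpos : ((PySem.List.enumerate ls).filter
      (fun p => PySem.Str.isIn "&" p.2)).map (fun p => p.1) = pvPos 0 ls := rfl
  rw [hpos]
  by_cases hg : 0 ≤ row_index ∧ row_index < ((pvPos 0 ls).length : Int)
  · rw [if_pos hg, pvMain ls 0 row_index hg.1 hg.2]
  · rw [if_neg hg]
    congr 1
    rcases lt_or_ge row_index 0 with h | h
    · exact pvRem_neg ls row_index h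
    · apply pvRem_ge
      have := pvPos_length 0 ls
      omega
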